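-- pv_equiv track=rewrite | github.com/hzs0084/CodingInterviews | AT&T/Systems and DevOps Engineer Assessment/Question2.py | countIncreasingSegments
-- ===== SOURCE A (Python) =====
-- def countIncreasingSegments(yCoordinates, k):
--     n = len(yCoordinates)
--     count = 0
--
--     # Loop through the array to find all segments of length k
--     for i in range(n - k + 1):
--         is_increasing = True
--         # Check if the segment is increasing
--         for j in range(i, i + k - 1):
--             if yCoordinates[j] >= yCoordinates[j + 1]:
--                 is_increasing = False
--                 break
--         if is_increasing:
--             count += 1
--
--     return count
-- ===== SOURCE B (Python) =====
-- def countIncreasingSegments(yCoordinates, k):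
--     n = len(yCoordinates)
--     if k <= 1:
--         # every window of length <= 1 is trivially increasing
--         return n - k + 1
--     run = 1          # length of the strictly increasing run ending at the current index
--     count = 0
--     for idx in range(1, n):
--         if yCoordinates[idx - 1] < yCoordinates[idx]:
--             run += 1
--         else:
--             run = 1
--         if run >= k:
--             count += 1
--     return count
-- ===== Notes on version B (the rewrite author's own statement) =====
-- stated objective: alternative
-- what changed: Replaces the nested window-by-window adjacent-pair re-check with a single sliding pass that maintains the length of the strictly increasing run ending at each index and counts indices where that run reaches k.
import Mathlib
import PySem

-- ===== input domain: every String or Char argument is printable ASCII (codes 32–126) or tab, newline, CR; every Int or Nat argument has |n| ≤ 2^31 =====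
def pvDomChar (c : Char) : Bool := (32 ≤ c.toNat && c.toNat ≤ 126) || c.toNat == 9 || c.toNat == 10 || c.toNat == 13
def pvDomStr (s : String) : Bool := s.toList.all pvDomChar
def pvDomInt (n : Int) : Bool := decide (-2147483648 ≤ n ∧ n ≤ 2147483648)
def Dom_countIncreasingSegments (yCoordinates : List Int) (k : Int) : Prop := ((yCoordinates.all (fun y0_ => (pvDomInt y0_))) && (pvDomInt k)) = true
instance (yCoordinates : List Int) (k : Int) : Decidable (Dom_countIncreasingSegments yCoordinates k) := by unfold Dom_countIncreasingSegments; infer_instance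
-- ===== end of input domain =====

-- B replaces A's per-window adjacent-pair re-check by one sliding pass tracking the
-- length of the strictly increasing run ending at each index (objective: alternative).

-- ===== PORT A =====
-- inner 'for j in range(i, i+k-1)' loop with its break, over the list of j values
def pvInnerA (xs : List Int) : List Int → Bool
  | [] => true
  | j :: rest =>
      if PySem.List.pyGetD xs (j + 1) 0 ≤ PySem.List.pyGetD xs j 0 then false
      else pvInnerA xs rest

def countIncreasingSegments (yCoordinates : List Int) (k : Int) : Int :=
  let n : Int := PySem.List.len yCoordinates
  (PySem.List.pyRange 0 (n - k + 1) 1).foldl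
    (fun count i =>
      if pvInnerA yCoordinates (PySem.List.pyRange i (i + k - 1) 1) then count + 1 else count) 0

-- ===== PORT B =====
def countIncreasingSegments_alt (yCoordinates : List Int) (k : Int) : Int :=
  let n : Int := PySem.List.len yCoordinates
  if k ≤ 1 then n - k + 1
  else
    ((PySem.List.pyRange 1 n 1).foldl
      (fun (s : Int × Int) idx =>
        let run : Int :=
          if PySem.List.pyGetD yCoordinates (idx - 1) 0 < PySem.List.pyGetD yCoordinates idx 0
          then s.1 + 1 else 1
        (run, if k ≤ run then s.2 + 1 else s.2)) ((1 : Int), (0 : Int))).2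

-- ===== PRECONDITION & SPEC =====
def Spec_countIncreasingSegments (yCoordinates : List Int) (k : Int) (out : Int) : Prop := out = countIncreasingSegments_alt yCoordinates k
instance (yCoordinates : List Int) (k : Int) (out : Int) : Decidable (Spec_countIncreasingSegments yCoordinates k out) := by unfold Spec_countIncreasingSegments; infer_instance

-- ===== CLAIM (what is proved, stated in full; the proofs are below) =====
def Claim_equal_countIncreasingSegments : Prop := ∀ (yCoordinates : List Int) (k : Int), Dom_countIncreasingSegments yCoordinates k → Spec_countIncreasingSegments yCoordinates k (countIncreasingSegments yCoordinates k)

-- ===== LEMMAS AND PROOFS =====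

-- 'is window [i, i+m] strictly increasing': all m adjacent pairs starting at i rise
abbrev pvInc (xs : List Int) (i m : Nat) : Prop :=
  ∀ t < m, xs.getD (i + t) 0 < xs.getD (i + t + 1) 0

-- run length of the strictly increasing run ending at index j (B's 'run' variable)
def pvRun (xs : List Int) : Nat → Int
  | 0 => 1
  | j + 1 => if xs.getD j 0 < xs.getD (j + 1) 0 then pvRun xs j + 1 else 1

theorem pvRun_pos (xs : List Int) (j : Nat) : 1 ≤ pvRun xs j := by
  cases j with
  | zero => simp [pvRun]
  | succ j =>
      simp only [pvRun]
      split
      · have := pvRun_pos xs j; omega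
      · omega

theorem pvInc_succ (xs : List Int) (i m : Nat) :
    pvInc xs i (m + 1) ↔ pvInc xs i m ∧ xs.getD (i + m) 0 < xs.getD (i + m + 1) 0 := by
  unfold pvInc
  constructor
  · intro h; exact ⟨fun t ht => h t (by omega), h m (by omega)⟩
  · rintro ⟨h1, h2⟩ t ht
    rcases Nat.lt_succ_iff_lt_or_eq.mp ht with h | rfl
    · exact h1 t h
    · exact h2

-- characterisation of the run length: run ≥ m+1 iff a window of m rising pairs ends at j
theorem pvRun_ge_iff (xs : List Int) (j m : Nat) :
    ((m : Int) + 1 ≤ pvRun xs j) ↔ ∃ i, i + m = j ∧ pvInc xs i m := by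
  induction j generalizing m with
  | zero =>
      cases m with
      | zero => simp [pvRun, pvInc]
      | succ m =>
          simp only [pvRun]
          constructor
          · intro h; exfalso; push_cast at h; omega
          · rintro ⟨i, hi, -⟩; omega
  | succ j ih =>
      cases m with
      | zero =>
          have := pvRun_pos xs (j + 1)
          constructor
          · intro _; exact ⟨j + 1, by simp, fun t ht => by omega⟩
          · intro _; omega
      | succ m =>
          simp only [pvRun]
          split
          · rename_i hc
            constructor
            · intro h
              have : (m : Int) + 1 ≤ pvRun xs j := by push_cast at h ⊢; omega
              obtain ⟨i, hi, hinc⟩ := (ih m).mp this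
              exact ⟨i, by omega, (pvInc_succ xs i m).mpr ⟨hinc, by
                have : i + m = j := hi; rw [this]; exact hc⟩⟩
            · rintro ⟨i, hi, hinc⟩
              have him : i + m = j := by omega
              have := (ih m).mpr ⟨i, him, ((pvInc_succ xs i m).mp hinc).1⟩
              push_cast; omega
          · rename_i hc
            constructor
            · intro h; exfalso; push_cast at h; omega
            · rintro ⟨i, hi, hinc⟩
              exfalso
              have him : i + m = j := by omega
              have := ((pvInc_succ xs i m).mp hinc).2
              rw [him] at this; exact hc this

theorem pvInc_cons (xs : List Int) (i m : Nat) :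
    pvInc xs i (m + 1) ↔ xs.getD i 0 < xs.getD (i + 1) 0 ∧ pvInc xs (i + 1) m := by
  unfold pvInc
  constructor
  · intro h
    refine ⟨by simpa using h 0 (by omega), fun t ht => ?_⟩
    have := h (t + 1) (by omega)
    rw [show i + (t + 1) = i + 1 + t from by omega] at this
    exact this
  · rintro ⟨h0, h⟩ t ht
    cases t with
    | zero => simpa using h0
    | succ t =>
        have := h t (by omega)
        rw [show i + 1 + t = i + (t + 1) from by omega] at this
        exact this

-- A's inner loop over explicit j-lists computes the window check
theorem pvInnerA_spec (xs : List Int) :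
    ∀ (m i : Nat), pvInnerA xs (PySem.List.pyRange (i : Int) ((i : Int) + (m : Int)) 1)
      = decide (pvInc xs i m)
  | 0, i => by
      rw [PySem.List.pyRange_one_eq_nil (by omega)]
      simp [pvInnerA, pvInc]
  | m + 1, i => by
      rw [PySem.List.pyRange_one_cons (by push_cast; omega)]
      simp only [pvInnerA]
      rw [show (i : Int) + ((m + 1 : Nat) : Int) = ((i + 1 : Nat) : Int) + (m : Int) from by
            push_cast; ring,
          show (i : Int) + 1 = ((i + 1 : Nat) : Int) from by push_cast; ring]
      rw [pvInnerA_spec xs m (i + 1)]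
      rw [PySem.List.pyGetD_natCast, PySem.List.pyGetD_natCast]
      by_cases h : xs.getD (i + 1) 0 ≤ xs.getD i 0
      · have hni : ¬ pvInc xs i (m + 1) := fun hin =>
          absurd ((pvInc_cons xs i m).mp hin).1 (by omega)
        simp [hni]
        intro hlt
        rw [List.getD_eq_getElem?_getD, List.getD_eq_getElem?_getD] at h
        omega
      · have h' : xs.getD i 0 < xs.getD (i + 1) 0 := by omega
        have hiff : pvInc xs i (m + 1) ↔ pvInc xs (i + 1) m :=
          ⟨fun a => ((pvInc_cons xs i m).mp a).2, fun b => (pvInc_cons xs i m).mpr ⟨h', b⟩⟩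
        simp [hiff]
        intro _
        rw [List.getD_eq_getElem?_getD, List.getD_eq_getElem?_getD] at h'
        exact h'

-- A's count equals the Nat count of increasing windows
theorem portA_eq (xs : List Int) (k : Int) (m : Nat) (hm : (k : Int) = (m : Int) + 1) :
    countIncreasingSegments xs k
      = ((List.range (xs.length - m)).countP (fun i => decide (pvInc xs i m)) : Int) := by
  simp only [countIncreasingSegments, PySem.List.len_eq]
  rw [PySem.List.pyRange_one 0 ((xs.length : Int) - k + 1), List.foldl_map]
  rw [PySem.List.foldl_congr_mem _ _
    (fun (c : Int) (i : Nat) => if decide (pvInc xs i m) then c + 1 else c) 0 ?_]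
  · rw [PySem.List.foldl_count_if (fun i => decide (pvInc xs i m))]
    rw [show ((xs.length : Int) - k + 1 - 0).toNat = xs.length - m from by omega]
    simp
  · intro c i _
    rw [show (0 : Int) + (i : Int) + k - 1 = (i : Int) + (m : Int) from by omega,
        show (0 : Int) + (i : Int) = ((i : Nat) : Int) from by omega]
    rw [pvInnerA_spec xs m i]

-- B's loop invariant: after processing indices 1..N'-1 the state is
-- (run ending at N'-1, number of indices below N' whose run reaches k)
theorem pvBfold (xs : List Int) (k : Int) (hk : 2 ≤ k) :
    ∀ N' : Nat,
    (PySem.List.pyRange 1 (N' : Int) 1).foldl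
      (fun (s : Int × Int) idx =>
        let run : Int :=
          if PySem.List.pyGetD xs (idx - 1) 0 < PySem.List.pyGetD xs idx 0
          then s.1 + 1 else 1
        (run, if k ≤ run then s.2 + 1 else s.2)) ((1 : Int), (0 : Int))
      = (pvRun xs (N' - 1),
         ((List.range N').countP (fun j => decide (k ≤ pvRun xs j)) : Int)) := by
  intro N'
  induction N' with
  | zero => rw [PySem.List.pyRange_one_eq_nil (by omega)]; simp [pvRun]
  | succ N ih =>
      by_cases hN : N = 0
      · subst hN
        rw [show ((1 : Nat) : Int) = (1 : Int) from rfl, PySem.List.pyRange_one_eq_nil (by omega)]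
        simp [pvRun, List.range_succ]
        omega
      · rw [show ((N + 1 : Nat) : Int) = (N : Int) + 1 from by push_cast; ring,
            PySem.List.pyRange_one_succ_right (by omega), List.foldl_append, ih]
        simp only [List.foldl_cons, List.foldl_nil]
        have e1 : (N : Int) - 1 = ((N - 1 : Nat) : Int) := by omega
        have e2 : N - 1 + 1 = N := by omega
        have hr : (if PySem.List.pyGetD xs ((N : Int) - 1) 0 < PySem.List.pyGetD xs (N : Int) 0
              then pvRun xs (N - 1) + 1 else 1) = pvRun xs N := by
          rw [e1, PySem.List.pyGetD_natCast, PySem.List.pyGetD_natCast]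
          conv_rhs => rw [← e2]
          simp only [pvRun]
          rw [e2]
        rw [hr]
        have hc : ((List.range (N + 1)).countP (fun j => decide (k ≤ pvRun xs j)) : Int)
            = ((List.range N).countP (fun j => decide (k ≤ pvRun xs j)) : Int)
              + (if k ≤ pvRun xs N then 1 else 0) := by
          rw [List.range_succ, List.countP_append]
          by_cases h : k ≤ pvRun xs N <;> simp [h]
        rw [hc]
        by_cases h : k ≤ pvRun xs N <;> simp [h]

-- B's count equals the Nat count of indices whose run reaches k
theorem portB_eq (xs : List Int) (k : Int) (m : Nat) (hm : (k : Int) = (m : Int) + 1)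
    (hk : ¬ k ≤ 1) :
    countIncreasingSegments_alt xs k
      = ((List.range xs.length).countP (fun j => decide ((m : Int) + 1 ≤ pvRun xs j)) : Int) := by
  simp only [countIncreasingSegments_alt, PySem.List.len_eq, if_neg hk]
  rw [pvBfold xs k (by omega) xs.length]
  simp only [hm]

-- decidable form of 'a window of m rising pairs ends at j'
theorem pv_window_end_iff (xs : List Int) (j m : Nat) :
    (∃ i, i + m = j ∧ pvInc xs i m) ↔ (m ≤ j ∧ pvInc xs (j - m) m) := by
  constructor
  · rintro ⟨i, rfl, h⟩; exact ⟨by omega, by simpa using h⟩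
  · rintro ⟨h1, h2⟩; exact ⟨j - m, by omega, h2⟩

-- the reindexing: windows counted by end index = windows counted by start index
theorem count_shift (xs : List Int) (m : Nat) :
    (List.range xs.length).countP (fun j => decide (m ≤ j ∧ pvInc xs (j - m) m))
      = (List.range (xs.length - m)).countP (fun i => decide (pvInc xs i m)) := by
  by_cases h : m ≤ xs.length
  · rw [show xs.length = m + (xs.length - m) from by omega, List.range_add,
        List.countP_append, List.countP_map]
    have h1 : (List.range m).countP (fun j => decide (m ≤ j ∧ pvInc xs (j - m) m)) = 0 := by
      rw [List.countP_eq_zero]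
      intro j hj
      simp only [List.mem_range] at hj
      simp only [decide_eq_true_eq, not_and]
      omega
    rw [h1, show m + (xs.length - m) - m = xs.length - m from by omega]
    simp only [Nat.zero_add]
    apply List.countP_congr
    intro i _
    simp only [Function.comp_apply, decide_eq_true_eq]
    constructor
    · rintro ⟨-, hi⟩; simpa using hi
    · intro hi; exact ⟨by omega, by simpa using hi⟩
  · rw [show xs.length - m = 0 from by omega]
    simp only [List.range_zero, List.countP_nil]
    rw [List.countP_eq_zero]
    intro j hj
    simp only [List.mem_range] at hj
    simp only [decide_eq_true_eq, not_and]
    omega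

theorem trivial_case (xs : List Int) (k : Int) (hk : k ≤ 1) :
    countIncreasingSegments xs k = PySem.List.len xs - k + 1 := by
  simp only [countIncreasingSegments]
  rw [PySem.List.foldl_congr_mem _ _ (fun (c : Int) (_ : Int) => c + 1) 0 ?_]
  · rw [PySem.List.foldl_add _ (fun _ => 1) 0]
    simp [PySem.List.length_pyRange_one, PySem.List.len_eq]
    omega
  · intro c i _
    rw [PySem.List.pyRange_one_eq_nil (by omega)]
    simp [pvInnerA]

-- ===== VERDICT (by name: the statement is the Claim_ definition above) =====
theorem countIncreasingSegments_spec : Claim_equal_countIncreasingSegments := by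
  intro xs k _
  unfold Spec_countIncreasingSegments
  by_cases hk : k ≤ 1
  · rw [trivial_case xs k hk]
    unfold countIncreasingSegments_alt
    simp [hk]
  · have hm : ∃ m : Nat, (k : Int) = (m : Int) + 1 := by
      refine ⟨(k - 1).toNat, ?_⟩; omega
    obtain ⟨m, hm⟩ := hm
    rw [portA_eq xs k m hm, portB_eq xs k m hm hk, ← count_shift xs m]
    congr 1
    apply List.countP_congr
    intro j _
    simp only [decide_eq_true_eq]
    rw [pvRun_ge_iff, pv_window_end_iff]
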